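-- pv_equiv track=rewrite | github.com/holoborodko96/python-homework | lesson_11/homework.py | find_max_score
-- ===== SOURCE A (Python) =====
-- def find_max_score(score_dict):
--
--     result = {}
--     max_score = 0
--     for name, score in score_dict.items():
--         if score >= max_score:
--             max_score = score
--     for name, score in score_dict.items():
--         if score == max_score:
--             result[name]=score
--
--     return result
-- ===== SOURCE B (Python) =====
-- def find_max_score(score_dict):
--     max_score = 0
--     result = {}
--     for name, score in score_dict.items():
--         if score > max_score:
--             max_score = score
--             result = {name: score}
--         elif score == max_score:
--             result[name] = score
--     return result
-- ===== Notes on version B (the rewrite author's own statement) =====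
-- stated objective: alternative
-- what changed: Replaces A's two sequential passes (find the max, then filter entries equal to it) with a single streaming pass that maintains the running maximum together with the dict of names at that maximum, resetting the dict whenever a strictly larger score appears (keeping A's max_score=0 initialization).
import Mathlib
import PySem

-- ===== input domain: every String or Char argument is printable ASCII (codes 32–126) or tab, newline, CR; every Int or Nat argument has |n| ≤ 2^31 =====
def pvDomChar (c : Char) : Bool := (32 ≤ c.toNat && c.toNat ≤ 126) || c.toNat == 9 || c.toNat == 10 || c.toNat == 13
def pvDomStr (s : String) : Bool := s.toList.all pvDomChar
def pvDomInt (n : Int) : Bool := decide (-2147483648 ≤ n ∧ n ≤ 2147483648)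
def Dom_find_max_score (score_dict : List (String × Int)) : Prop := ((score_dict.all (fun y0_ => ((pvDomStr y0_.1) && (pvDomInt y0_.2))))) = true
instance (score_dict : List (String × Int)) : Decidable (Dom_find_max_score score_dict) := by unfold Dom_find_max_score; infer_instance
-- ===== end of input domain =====

-- B fuses A's two passes into one streaming best-so-far pass (same cost, different decomposition); return-value equivalence only.

-- ===== PORT A =====
-- two passes: first find max_score (initialised to 0), then collect all entries equal to it
def find_max_score (score_dict : List (String × Int)) : List (String × Int) :=
  let max_score : Int := score_dict.foldl (fun m p => if p.2 ≥ m then p.2 else m) 0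
  let result : PySem.Dict String Int :=
    score_dict.foldl (fun r p => if p.2 = max_score then r.insert p.1 p.2 else r) PySem.Dict.empty
  result.items

-- ===== PORT B =====
-- single pass: carry (running max, dict of names at that max); a strictly larger score resets the dict
def find_max_score_alt (score_dict : List (String × Int)) : List (String × Int) :=
  let st : Int × PySem.Dict String Int :=
    score_dict.foldl
      (fun st p =>
        if p.2 > st.1 then (p.2, PySem.Dict.ofList [p])
        else if p.2 = st.1 then (st.1, st.2.insert p.1 p.2) else st)
      (0, PySem.Dict.empty)
  st.2.items

-- ===== PRECONDITION & SPEC =====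
def Spec_find_max_score (score_dict : List (String × Int)) (out : List (String × Int)) : Prop := out = find_max_score_alt score_dict
instance (score_dict : List (String × Int)) (out : List (String × Int)) : Decidable (Spec_find_max_score score_dict out) := by unfold Spec_find_max_score; infer_instance

-- ===== CLAIM (what is proved, stated in full; the proofs are below) =====
def Claim_equal_find_max_score : Prop := ∀ (score_dict : List (String × Int)), Dom_find_max_score score_dict → Spec_find_max_score score_dict (find_max_score score_dict)

-- ===== LEMMAS AND PROOFS =====

-- A's first pass from an arbitrary start value
def pvAmax (m : Int) (xs : List (String × Int)) : Int :=
  xs.foldl (fun m p => if p.2 ≥ m then p.2 else m) m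

-- A's second pass: collect entries equal to M into r
def pvAres (M : Int) (r : PySem.Dict String Int) (xs : List (String × Int)) : PySem.Dict String Int :=
  xs.foldl (fun r p => if p.2 = M then r.insert p.1 p.2 else r) r

-- B's single pass from an arbitrary state
def pvBfold (st : Int × PySem.Dict String Int) (xs : List (String × Int)) : Int × PySem.Dict String Int :=
  xs.foldl
    (fun st p =>
      if p.2 > st.1 then (p.2, PySem.Dict.ofList [p])
      else if p.2 = st.1 then (st.1, st.2.insert p.1 p.2) else st)
    st

theorem pvAmax_cons (m s : Int) (n : String) (xs : List (String × Int)) :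
    pvAmax m ((n, s) :: xs) = pvAmax (if s ≥ m then s else m) xs := rfl

theorem pvAres_cons (M s : Int) (n : String) (r : PySem.Dict String Int) (xs : List (String × Int)) :
    pvAres M r ((n, s) :: xs) = pvAres M (if s = M then r.insert n s else r) xs := rfl

theorem pvBfold_cons (m s : Int) (n : String) (r : PySem.Dict String Int) (xs : List (String × Int)) :
    pvBfold (m, r) ((n, s) :: xs) =
      pvBfold (if s > m then (s, PySem.Dict.ofList [(n, s)])
               else if s = m then (m, r.insert n s) else (m, r)) xs := rfl

theorem pvAmax_le (xs : List (String × Int)) (m : Int) : m ≤ pvAmax m xs := by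
  induction xs generalizing m with
  | nil => simp [pvAmax]
  | cons x xs ih =>
    rcases x with ⟨n, s⟩
    rw [pvAmax_cons]
    split_ifs with h
    · exact le_trans h (ih s)
    · exact ih m

-- invariant: B's state after xs is A's running max, paired with A's filter pass,
-- restarted from empty iff the max strictly increased along xs
theorem pvBfold_eq (xs : List (String × Int)) (m : Int) (r : PySem.Dict String Int) :
    pvBfold (m, r) xs =
      (pvAmax m xs,
        if m < pvAmax m xs then pvAres (pvAmax m xs) PySem.Dict.empty xs
        else pvAres (pvAmax m xs) r xs) := by
  induction xs generalizing m r with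
  | nil =>
    simp only [pvBfold, pvAmax, pvAres, List.foldl_nil, lt_self_iff_false, if_neg,
      not_false_iff]
  | cons x xs ih =>
    rcases x with ⟨n, s⟩
    rw [pvBfold_cons, pvAmax_cons, pvAres_cons, pvAres_cons]
    by_cases h1 : s > m
    · rw [if_pos h1, if_pos (le_of_lt h1), ih]
      have hle : s ≤ pvAmax s xs := pvAmax_le xs s
      have hmlt : m < pvAmax s xs := lt_of_lt_of_le h1 hle
      rw [if_pos hmlt]
      by_cases h2 : s < pvAmax s xs
      · rw [if_pos h2, if_neg (ne_of_lt h2)]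
      · have heq : s = pvAmax s xs := le_antisymm hle (le_of_not_gt h2)
        rw [if_neg h2, if_pos heq]
        rfl
    · by_cases h2 : s = m
      · subst h2
        rw [if_neg h1, if_pos rfl, if_pos le_rfl, ih]
        by_cases h3 : s < pvAmax s xs
        · simp only [if_pos h3, if_neg (ne_of_lt h3)]
        · have heq : s = pvAmax s xs := le_antisymm (pvAmax_le xs s) (le_of_not_gt h3)
          simp only [if_neg h3, if_pos heq]
      · have hlt : s < m := lt_of_le_of_ne (le_of_not_gt h1) h2
        rw [if_neg h1, if_neg h2, if_neg (not_le_of_gt hlt), ih]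
        have hne : s ≠ pvAmax m xs := ne_of_lt (lt_of_lt_of_le hlt (pvAmax_le xs m))
        rw [if_neg hne, if_neg hne]

-- ===== VERDICT (by name: the statement is the Claim_ definition above) =====
theorem find_max_score_spec : Claim_equal_find_max_score := by
  intro xs _
  show find_max_score xs = find_max_score_alt xs
  have hA : find_max_score xs = (pvAres (pvAmax 0 xs) PySem.Dict.empty xs).items := rfl
  have hB : find_max_score_alt xs = (pvBfold (0, PySem.Dict.empty) xs).2.items := rfl
  rw [hA, hB, pvBfold_eq]
  by_cases h : (0 : Int) < pvAmax 0 xs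
  · rw [if_pos h]
  · rw [if_neg h]
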